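-- pv_equiv track=rewrite | github.com/SeanChen327/tictactoe-ai-coach | ai_battle_engine.py | evaluate_cell
-- ===== SOURCE A (Python) =====
-- BOARD_SIZE = 15
--
-- def evaluate_cell(board, index, player):
--     r, c = divmod(index, BOARD_SIZE)
--     directions = [(1, 0), (0, 1), (1, 1), (1, -1)]
--     total_score = 0
--
--     for dr, dc in directions:
--         count = 1
--         open_ends = 0
--         # Check both directions
--         for sign in [1, -1]:
--             for step in range(1, 5):
--                 nr, nc = r + sign * dr * step, c + sign * dc * step
--                 if 0 <= nr < BOARD_SIZE and 0 <= nc < BOARD_SIZE: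
--                     if board[nr * BOARD_SIZE + nc] == player:
--                         count += 1
--                     elif board[nr * BOARD_SIZE + nc] == "":
--                         open_ends += 1
--                         break
--                     else: break
--                 else: break
--
--         if count >= 5: return 100000
--         if count == 4:
--             total_score += 10000 if open_ends == 2 else 1000
--         elif count == 3:
--             total_score += 500 if open_ends == 2 else 50
--         elif count == 2:
--             total_score += 50 if open_ends == 2 else 5
--         elif count == 1:
--             total_score += 5
--     return total_score
-- ===== SOURCE B (Python) =====
-- BOARD_SIZE = 15
--
-- def evaluate_cell(board, index, player):
--     # Data-first decomposition: build each outward ray as an explicit list of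
--     # cell values (None = wall), then score from the leading runs.
--     r, c = divmod(index, BOARD_SIZE)
--     total_score = 0
--     for dr, dc in ((1, 0), (0, 1), (1, 1), (1, -1)):
--         count = 1
--         open_ends = 0
--         for sign in (1, -1):
--             ray = []
--             for step in range(1, 5):
--                 nr, nc = r + sign * dr * step, c + sign * dc * step
--                 if 0 <= nr < BOARD_SIZE and 0 <= nc < BOARD_SIZE:
--                     ray.append(board[nr * BOARD_SIZE + nc])
--                 else:
--                     ray.append(None)
--             run = 0
--             while run < 4 and ray[run] == player:
--                 run += 1
--             count += run
--             if run < 4 and ray[run] == "":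
--                 open_ends += 1
--         if count >= 5:
--             return 100000
--         if count == 4:
--             total_score += 10000 if open_ends == 2 else 1000
--         elif count == 3:
--             total_score += 500 if open_ends == 2 else 50
--         elif count == 2:
--             total_score += 50 if open_ends == 2 else 5
--         elif count == 1:
--             total_score += 5
--     return total_score
-- ===== Notes on version B (the rewrite author's own statement) =====
-- stated objective: alternative
-- what changed: Instead of A's break-on-mismatch scan that mutates (count, open_ends) step by step, B first materialises each outward ray as an explicit 4-cell list (None = off-grid wall), then derives count from the leading run lengths and open_ends from the cell right after each run, keeping the same scores, direction order and early 100000 return.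
-- outside the precondition, e.g. on evaluate_cell([''], -49, 'x'): A returns 20, B raises IndexError
import Mathlib
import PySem

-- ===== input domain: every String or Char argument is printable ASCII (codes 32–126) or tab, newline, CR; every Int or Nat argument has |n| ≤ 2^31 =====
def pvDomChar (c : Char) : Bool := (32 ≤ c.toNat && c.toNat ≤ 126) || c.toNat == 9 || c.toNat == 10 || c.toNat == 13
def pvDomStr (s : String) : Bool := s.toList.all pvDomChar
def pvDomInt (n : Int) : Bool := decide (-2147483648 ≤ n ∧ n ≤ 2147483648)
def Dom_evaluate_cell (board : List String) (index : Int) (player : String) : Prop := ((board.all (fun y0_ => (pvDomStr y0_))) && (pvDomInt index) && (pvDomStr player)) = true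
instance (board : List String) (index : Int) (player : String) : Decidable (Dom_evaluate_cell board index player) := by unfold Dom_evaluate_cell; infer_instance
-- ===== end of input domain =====

-- B re-implements the cell scorer data-first: each outward ray is materialised as a
-- list of cell values (none = off-grid wall) and scored from its leading run;
-- same scores, same direction order, same early 100000 return. (objective: alternative)

-- ===== PORT A =====
-- inner loop 'for step in range(1, 5)' with break, state (count, open_ends);
-- the 'none' branch is a Python IndexError, excluded by Pre_ (the port breaks there).
def pvScanA (board : List String) (player : String) (r c dr dc sg : Int) :
    List Int → Int × Int → Int × Int
  | [], st => st
  | step :: rest, (count, opens) =>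
    let nr := r + sg * dr * step
    let nc := c + sg * dc * step
    if 0 ≤ nr ∧ nr < 15 ∧ 0 ≤ nc ∧ nc < 15 then
      match PySem.List.pyGet? board (nr * 15 + nc) with
      | some v =>
        if v = player then pvScanA board player r c dr dc sg rest (count + 1, opens)
        else if v = "" then (count, opens + 1)
        else (count, opens)
      | none => (count, opens)   -- IndexError in Python: outside Pre_evaluate_cell
    else (count, opens)

-- outer 'for dr, dc in directions' with the early 'return 100000' and the score chain
def pvDirsA (board : List String) (player : String) (r c : Int) :
    List (Int × Int) → Int → Int
  | [], total => total
  | (dr, dc) :: rest, total =>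
    let st1 := pvScanA board player r c dr dc 1 (PySem.List.pyRange 1 5 1) (1, 0)
    let st := pvScanA board player r c dr dc (-1) (PySem.List.pyRange 1 5 1) st1
    if st.1 ≥ 5 then 100000
    else if st.1 = 4 then pvDirsA board player r c rest (total + if st.2 = 2 then 10000 else 1000)
    else if st.1 = 3 then pvDirsA board player r c rest (total + if st.2 = 2 then 500 else 50)
    else if st.1 = 2 then pvDirsA board player r c rest (total + if st.2 = 2 then 50 else 5)
    else if st.1 = 1 then pvDirsA board player r c rest (total + 5)
    else pvDirsA board player r c rest total

def evaluate_cell (board : List String) (index : Int) (player : String) : Int :=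
  let r := PySem.Int.floordiv index 15
  let c := PySem.Int.mod index 15
  pvDirsA board player r c [(1, 0), (0, 1), (1, 1), (1, -1)] 0

-- ===== PORT B =====
-- one ray cell: board[i] if the square is on the grid, else none (wall);
-- the pyGet? 'none' case (missing cell of a short board) is an IndexError in
-- Python B, excluded by Pre_ — the port treats it as a wall there.
def pvCellB (board : List String) (r c dr dc sg step : Int) : Option String :=
  let nr := r + sg * dr * step
  let nc := c + sg * dc * step
  if 0 ≤ nr ∧ nr < 15 ∧ 0 ≤ nc ∧ nc < 15 then
    PySem.List.pyGet? board (nr * 15 + nc)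
  else none

def pvRayB (board : List String) (r c dr dc sg : Int) : List (Option String) :=
  (PySem.List.pyRange 1 5 1).map (pvCellB board r c dr dc sg)

-- 'while run < 4 and ray[run] == player' = length of the leading run of the ray
def pvRunB (player : String) : List (Option String) → Int
  | [] => 0
  | x :: xs => if x = some player then pvRunB player xs + 1 else 0

-- 'run < 4 and ray[run] == ""' = the cell right after the leading run is empty
def pvOpenB (player : String) : List (Option String) → Bool
  | [] => false
  | x :: xs => if x = some player then pvOpenB player xs else decide (x = some "")

def pvScoreB (count opens : Int) : Int :=
  if count = 4 then (if opens = 2 then 10000 else 1000)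
  else if count = 3 then (if opens = 2 then 500 else 50)
  else if count = 2 then (if opens = 2 then 50 else 5)
  else if count = 1 then 5
  else 0

def pvDirsB (board : List String) (player : String) (r c : Int) :
    List (Int × Int) → Int → Int
  | [], total => total
  | (dr, dc) :: rest, total =>
    let ray1 := pvRayB board r c dr dc 1
    let ray2 := pvRayB board r c dr dc (-1)
    let count := 1 + pvRunB player ray1 + pvRunB player ray2
    let opens := (if pvOpenB player ray1 then (1 : Int) else 0) +
                 (if pvOpenB player ray2 then (1 : Int) else 0)
    if count ≥ 5 then 100000
    else pvDirsB board player r c rest (total + pvScoreB count opens)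

def evaluate_cell_alt (board : List String) (index : Int) (player : String) : Int :=
  let r := PySem.Int.floordiv index 15
  let c := PySem.Int.mod index 15
  pvDirsB board player r c [(1, 0), (0, 1), (1, 1), (1, -1)] 0

-- ===== PRECONDITION & SPEC =====
-- Pre_: every on-grid square within the 4-step scan reach of the cell exists in the
-- board list. A reads a subset of these cells and B reads all of them, so both return
-- and agree inside Pre_. Pre_ excludes some inputs on which A still returns: boards
-- short enough that a scanned cell is missing but whose scan breaks (or returns
-- 100000) before reaching it — there B's eager ray build raises IndexError.
def Pre_evaluate_cell (board : List String) (index : Int) (player : String) : Prop :=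
  let r := PySem.Int.floordiv index 15
  let c := PySem.Int.mod index 15
  ∀ d ∈ ([(1, 0), (0, 1), (1, 1), (1, -1)] : List (Int × Int)),
    ∀ sg ∈ ([1, -1] : List Int), ∀ s ∈ ([1, 2, 3, 4] : List Int),
      (0 ≤ r + sg * d.1 * s ∧ r + sg * d.1 * s < 15 ∧
       0 ≤ c + sg * d.2 * s ∧ c + sg * d.2 * s < 15) →
      (r + sg * d.1 * s) * 15 + (c + sg * d.2 * s) < (board.length : Int)

instance (board : List String) (index : Int) (player : String) :
    Decidable (Pre_evaluate_cell board index player) := by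
  unfold Pre_evaluate_cell; infer_instance

def pvWitness_evaluate_cell : List String × Int × String := (List.replicate 65 "", 0, "X")

def Spec_evaluate_cell (board : List String) (index : Int) (player : String) (out : Int) : Prop := out = evaluate_cell_alt board index player
instance (board : List String) (index : Int) (player : String) (out : Int) : Decidable (Spec_evaluate_cell board index player out) := by unfold Spec_evaluate_cell; infer_instance

-- ===== CLAIM (what is proved, stated in full; the proofs are below) =====
def Claim_equal_evaluate_cell : Prop := ∀ (board : List String) (index : Int) (player : String), Dom_evaluate_cell board index player → Pre_evaluate_cell board index player → Spec_evaluate_cell board index player (evaluate_cell board index player)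

-- ===== LEMMAS AND PROOFS =====

-- A's break-on-mismatch scan of one ray computes 'count += leading run' and
-- 'open_ends += (cell after the run is empty)', over any step list.
theorem pvScanA_eq_ray (board : List String) (player : String) (r c dr dc sg : Int)
    (steps : List Int) (count opens : Int) :
    pvScanA board player r c dr dc sg steps (count, opens) =
      (count + pvRunB player (steps.map (pvCellB board r c dr dc sg)),
       opens + (if pvOpenB player (steps.map (pvCellB board r c dr dc sg)) then 1 else 0)) := by
  induction steps generalizing count opens with
  | nil => simp [pvScanA, pvRunB, pvOpenB]
  | cons step rest ih =>
    simp only [pvScanA, List.map, pvCellB]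
    by_cases hg : 0 ≤ r + sg * dr * step ∧ r + sg * dr * step < 15 ∧
        0 ≤ c + sg * dc * step ∧ c + sg * dc * step < 15
    · simp only [hg]
      rcases hget : PySem.List.pyGet? board ((r + sg * dr * step) * 15 + (c + sg * dc * step)) with _ | v
      · simp [pvRunB, pvOpenB]
      · by_cases hp : v = player
        · simp only [hp, if_true, ih, pvRunB, pvOpenB]
          simp
          omega
        · by_cases he : v = ""
          · have hp' : ¬player = "" := fun h => hp (he.trans h.symm)
            simp [pvRunB, pvOpenB, he, hp']
          · simp [pvRunB, pvOpenB, hp, he]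
    · simp [hg, pvRunB, pvOpenB]

theorem pvScanA_eq_rayB (board : List String) (player : String) (r c dr dc sg : Int)
    (count opens : Int) :
    pvScanA board player r c dr dc sg (PySem.List.pyRange 1 5 1) (count, opens) =
      (count + pvRunB player (pvRayB board r c dr dc sg),
       opens + (if pvOpenB player (pvRayB board r c dr dc sg) then 1 else 0)) := by
  rw [pvRayB]; exact pvScanA_eq_ray board player r c dr dc sg _ count opens

theorem pvDirsA_eq_pvDirsB (board : List String) (player : String) (r c : Int)
    (dirs : List (Int × Int)) (total : Int) :
    pvDirsA board player r c dirs total = pvDirsB board player r c dirs total := by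
  induction dirs generalizing total with
  | nil => rfl
  | cons d rest ih =>
    obtain ⟨dr, dc⟩ := d
    simp only [pvDirsA, pvDirsB, pvScanA_eq_rayB, pvScoreB, zero_add, add_assoc]
    split_ifs <;> first | rfl | exact ih _ | (simp only [add_zero]; exact ih _)

theorem evaluate_cell_spec : Claim_equal_evaluate_cell := by
  intro board index player _ _
  unfold Spec_evaluate_cell evaluate_cell evaluate_cell_alt
  exact pvDirsA_eq_pvDirsB _ _ _ _ _ _
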